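-- pv_equiv track=rewrite | github.com/henrikkirchmann/semantic-aware-process-mining-distances | distances/activity_distances/chiorrini_2022_embedding_process_structure/new_parallelism_and_pathlength.py | merge_dicts_for_seq
-- ===== SOURCE A (Python) =====
-- from collections import defaultdict
--
-- def merge_dicts_for_seq(activity_positions_of_children):
--     merged_dict = defaultdict(int)
--     max_prev = 0  # Initial max value is 0
--
--     for d in activity_positions_of_children:
--         # Update the dictionary values by adding max_prev
--         updated_dict = {k: v + max_prev for k, v in d.items()}
--
--         # Get the new max value
--         max_prev = max(updated_dict.values(), default=0)
--
--         # Merge into the final dictionary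
--         for k, v in updated_dict.items():
--             merged_dict[k] += v
--
--     return dict(merged_dict)
-- ===== SOURCE B (Python) =====
-- from collections import defaultdict
--
-- def merge_dicts_for_seq(activity_positions_of_children):
--     # Pass 1: compute the offset each dict is shifted by (cumulative max;
--     # an empty dict resets the running offset to 0, like max(..., default=0)).
--     offsets = []
--     off = 0
--     for d in activity_positions_of_children:
--         offsets.append(off)
--         if d:
--             off = off + max(d.values())
--         else:
--             off = 0
--     # Pass 2: merge every dict, shifted by its offset, into one counter.
--     merged = defaultdict(int)
--     for d, off in zip(activity_positions_of_children, offsets):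
--         for k, v in d.items():
--             merged[k] += v + off
--     return dict(merged)
-- ===== Notes on version B (the rewrite author's own statement) =====
-- stated objective: alternative
-- what changed: Replaces A's single interleaved loop (shift each dict, recompute the running max from the shifted values, merge) by two separate passes: one that builds the list of cumulative offsets from the unshifted dicts, and one that merges each dict shifted by its paired offset into a defaultdict.
import Mathlib
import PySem

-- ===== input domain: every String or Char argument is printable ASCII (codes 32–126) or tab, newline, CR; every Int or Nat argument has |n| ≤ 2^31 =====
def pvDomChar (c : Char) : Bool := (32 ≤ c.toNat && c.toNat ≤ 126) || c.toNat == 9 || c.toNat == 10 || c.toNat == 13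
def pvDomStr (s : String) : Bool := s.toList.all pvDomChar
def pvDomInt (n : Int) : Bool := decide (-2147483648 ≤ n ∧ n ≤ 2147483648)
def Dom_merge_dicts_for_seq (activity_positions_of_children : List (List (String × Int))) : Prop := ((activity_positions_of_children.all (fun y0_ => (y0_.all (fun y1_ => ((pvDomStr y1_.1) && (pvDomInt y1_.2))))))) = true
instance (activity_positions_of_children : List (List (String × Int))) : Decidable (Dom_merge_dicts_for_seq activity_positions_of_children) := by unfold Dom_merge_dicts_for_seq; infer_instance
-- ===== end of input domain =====

-- B computes the same merge in two separate passes (offset list first, then merging); proved equal to A's interleaved single pass.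

-- ===== PORT A =====
-- one iteration of A's loop, state = (merged_dict, max_prev)
def mergeStepA (st : PySem.Dict String Int × Int) (d : List (String × Int)) : PySem.Dict String Int × Int :=
  let updated := (PySem.Dict.ofList d).items.map (fun kv => (kv.1, kv.2 + st.2))
  let maxPrev := match PySem.List.max? (updated.map Prod.snd) (fun v => v) with
    | some m => m
    | none => 0
  (updated.foldl (fun md kv => md.modify kv.1 0 (· + kv.2)) st.1, maxPrev)

def merge_dicts_for_seq (activity_positions_of_children : List (List (String × Int))) : List (String × Int) :=
  (activity_positions_of_children.foldl mergeStepA (PySem.Dict.empty, 0)).1.items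

-- ===== PORT B =====
-- pass 1: one iteration of the offsets loop, state = (offsets, off)
def offStepB (st : List Int × Int) (d : List (String × Int)) : List Int × Int :=
  (st.1 ++ [st.2],
   match PySem.List.max? ((PySem.Dict.ofList d).items.map Prod.snd) (fun v => v) with
   | some m => st.2 + m
   | none => 0)

-- pass 2: inner loop, merging one dict shifted by its offset
def mergeInnerB (md : PySem.Dict String Int) (p : List (String × Int) × Int) : PySem.Dict String Int :=
  (PySem.Dict.ofList p.1).items.foldl (fun md kv => md.modify kv.1 0 (· + (kv.2 + p.2))) md

def merge_dicts_for_seq_alt (activity_positions_of_children : List (List (String × Int))) : List (String × Int) :=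
  let offsets := (activity_positions_of_children.foldl offStepB ([], 0)).1
  ((activity_positions_of_children.zip offsets).foldl mergeInnerB PySem.Dict.empty).items

-- ===== PRECONDITION & SPEC =====
def Spec_merge_dicts_for_seq (activity_positions_of_children : List (List (String × Int))) (out : List (String × Int)) : Prop := out = merge_dicts_for_seq_alt activity_positions_of_children
instance (activity_positions_of_children : List (List (String × Int))) (out : List (String × Int)) : Decidable (Spec_merge_dicts_for_seq activity_positions_of_children out) := by unfold Spec_merge_dicts_for_seq; infer_instance

-- ===== CLAIM (what is proved, stated in full; the proofs are below) =====
def Claim_equal_merge_dicts_for_seq : Prop := ∀ (activity_positions_of_children : List (List (String × Int))), Dom_merge_dicts_for_seq activity_positions_of_children → Spec_merge_dicts_for_seq activity_positions_of_children (merge_dicts_for_seq activity_positions_of_children)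

-- ===== LEMMAS AND PROOFS =====
-- the offset update both programs perform after a dict d, given current offset off
def nextOff (off : Int) (d : List (String × Int)) : Int :=
  match PySem.List.max? ((PySem.Dict.ofList d).items.map Prod.snd) (fun v => v) with
  | some m => off + m
  | none => 0

-- the offsets list B's first pass produces, as a structural recursion
def offsRec : List (List (String × Int)) → Int → List Int
  | [], _ => []
  | d :: t, off => off :: offsRec t (nextOff off d)

theorem foldl_max_shift (c : Int) : ∀ (t : List Int) (x : Int),
    (t.map (fun v => v + c)).foldl max (x + c) = t.foldl max x + c := by
  intro t
  induction t with
  | nil => intro x; simp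
  | cons y t ih =>
    intro x
    simp only [List.map_cons, List.foldl_cons]
    rw [show max (x + c) (y + c) = max x y + c by omega]
    exact ih _

theorem max?_shift (l : List Int) (c : Int) :
    PySem.List.max? (l.map (fun v => v + c)) (fun v => v)
      = (PySem.List.max? l (fun v => v)).map (· + c) := by
  cases l with
  | nil => simp [PySem.List.max?]
  | cons x t =>
    simp [PySem.List.max?_id_cons, foldl_max_shift]

theorem stepA_eq (md : PySem.Dict String Int) (off : Int) (d : List (String × Int)) :
    mergeStepA (md, off) d = (mergeInnerB md (d, off), nextOff off d) := by
  unfold mergeStepA mergeInnerB nextOff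
  have hsnd : ((PySem.Dict.ofList d).items.map (fun kv => (kv.1, kv.2 + off))).map Prod.snd
      = ((PySem.Dict.ofList d).items.map Prod.snd).map (fun v => v + off) := by
    simp [List.map_map]
  refine Prod.ext ?_ ?_
  · simp [List.foldl_map]
  · simp only [hsnd, max?_shift]
    cases PySem.List.max? ((PySem.Dict.ofList d).items.map Prod.snd) (fun v => v) <;> simp [Int.add_comm]

theorem offsB_spec : ∀ (xs : List (List (String × Int))) (acc : List Int) (off : Int),
    (xs.foldl offStepB (acc, off)).1 = acc ++ offsRec xs off := by
  intro xs
  induction xs with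
  | nil => intro acc off; simp [offsRec]
  | cons d t ih =>
    intro acc off
    simp only [List.foldl_cons, offStepB, offsRec]
    rw [ih]
    simp [nextOff]

theorem mainA : ∀ (xs : List (List (String × Int))) (md : PySem.Dict String Int) (off : Int),
    (xs.foldl mergeStepA (md, off)).1 = (xs.zip (offsRec xs off)).foldl mergeInnerB md := by
  intro xs
  induction xs with
  | nil => intro md off; simp
  | cons d t ih =>
    intro md off
    simp only [List.foldl_cons, offsRec, List.zip_cons_cons, stepA_eq]
    exact ih _ _

-- ===== VERDICT (by name: the statement is the Claim_ definition above) =====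
theorem merge_dicts_for_seq_spec : Claim_equal_merge_dicts_for_seq := by
  intro xs _
  unfold Spec_merge_dicts_for_seq merge_dicts_for_seq merge_dicts_for_seq_alt
  rw [show (([] : List Int), (0 : Int)) = (([] : List Int), (0 : Int)) from rfl, offsB_spec,
      mainA]
  simp
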